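-- pv_equiv track=rewrite | github.com/efcawesome/AdventOfCode2023 | Day13/Day13.py | get_vert_symm_sum
-- ===== SOURCE A (Python) =====
-- def get_vert_symm_sum(pattern):
--     for j in range(len(pattern[0])):
--         k = 1
--         is_symm = False
--         while j - k > -1 and j + k - 1 < len(pattern[0]):
--             col1 = ""
--             col2 = ""
--             for i in range(len(pattern)):
--                 col1 += pattern[i][j - k]
--                 col2 += pattern[i][j + k - 1]
--
--             if col1 == col2:
--                 is_symm = True
--             else:
--                 is_symm = False
--                 break
--             k += 1
--
--         if is_symm:
--             return j
--
--     return 0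
-- ===== SOURCE B (Python) =====
-- def get_vert_symm_sum(pattern):
--     w = len(pattern[0])
--     cols = ["".join(row[j] for row in pattern) for j in range(w)]
--     for j in range(1, w):
--         m = min(j, w - j)
--         if cols[j - m:j][::-1] == cols[j:j + m]:
--             return j
--     return 0
-- ===== Notes on version B (the rewrite author's own statement) =====
-- stated objective: faster
-- what changed: B precomputes each column as a string once and tests a mirror at j by one reversed-slice comparison, replacing A's inner while/for loops that rebuild both column strings character by character for every (j,k) pair; Pre_ excludes the empty pattern and ragged patterns (a row shorter than row 0), where A raises IndexError except when it returns before reading past the short row, and B's eager column construction itself raises IndexError.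
-- outside the precondition, e.g. on get_vert_symm_sum(['..#', '##']): A returns 1, B raises IndexError
import Mathlib
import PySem

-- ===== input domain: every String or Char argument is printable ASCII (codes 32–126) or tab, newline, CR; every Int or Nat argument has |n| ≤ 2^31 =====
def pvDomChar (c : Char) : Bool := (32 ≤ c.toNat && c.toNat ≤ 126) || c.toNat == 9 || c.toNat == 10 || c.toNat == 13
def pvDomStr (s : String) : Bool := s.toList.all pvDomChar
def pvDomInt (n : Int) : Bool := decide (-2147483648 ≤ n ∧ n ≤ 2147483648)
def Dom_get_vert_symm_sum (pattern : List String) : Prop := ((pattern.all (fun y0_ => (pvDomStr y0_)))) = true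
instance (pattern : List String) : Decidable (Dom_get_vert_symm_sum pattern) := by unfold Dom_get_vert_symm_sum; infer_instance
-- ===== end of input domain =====

-- B precomputes each column string once and tests a mirror at j by one reversed-slice
-- comparison, instead of A's inner loops rebuilding both columns char by char per (j,k);
-- objective: faster (constant factor).
-- ===== PORT A =====
-- pattern[i][t]: strings handled as List Char; index in range under Pre_ (the default is never read there)
def pvCharA (pattern : List String) (i : Nat) (t : Int) : Char :=
  (pattern.getD i "").toList.getD t.toNat ' '

-- the inner 'for i in range(len(pattern))' building col1, col2 (strings as List Char)
def pvColsA (pattern : List String) (t1 t2 : Int) : List Char × List Char :=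
  (List.range pattern.length).foldl
    (fun c i => (c.1 ++ [pvCharA pattern i t1], c.2 ++ [pvCharA pattern i t2])) ([], [])

-- the 'while j - k > -1 and j + k - 1 < len(pattern[0])' loop
def pvWhileA (pattern : List String) (W j k : Int) (is_symm : Bool) : Bool :=
  if h : j - k > -1 ∧ j + k - 1 < W then
    let c := pvColsA pattern (j - k) (j + k - 1)
    if c.1 = c.2 then pvWhileA pattern W j (k + 1) true else false
  else is_symm
termination_by (j + 1 - k).toNat
decreasing_by omega

-- the 'for j in range(len(pattern[0]))' loop with early return
def pvForA (pattern : List String) (W : Int) : List Int → Int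
  | [] => 0
  | j :: js => if pvWhileA pattern W j 1 false then j else pvForA pattern W js

def get_vert_symm_sum (pattern : List String) : Int :=
  pvForA pattern ((pattern.headD "").length : Int)
    (PySem.List.pyRange 0 ((pattern.headD "").length : Int) 1)

-- ===== PORT B =====
-- "".join(row[j] for row in pattern) (strings as List Char; index in range under Pre_)
def pvColB (pattern : List String) (j : Nat) : List Char :=
  pattern.map (fun row => row.toList.getD j ' ')

-- the 'for j in range(1, w)' loop: cols[j-m:j][::-1] == cols[j:j+m]
def pvFindB (cols : List (List Char)) (w : Nat) : List Nat → Int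
  | [] => 0
  | j :: js =>
    let m := min j (w - j)
    if ((cols.take j).drop (j - m)).reverse = (cols.drop j).take m then (j : Int)
    else pvFindB cols w js

def get_vert_symm_sum_alt (pattern : List String) : Int :=
  let w := (pattern.headD "").length
  pvFindB ((List.range w).map (pvColB pattern)) w (List.range' 1 (w - 1))

-- ===== PRECONDITION & SPEC =====
-- Pre_ excludes the empty pattern and ragged patterns with a row shorter than row 0: there A
-- raises IndexError (except when it returns before reading past the short row) and B's eager
-- column construction itself raises IndexError.
def Pre_get_vert_symm_sum (pattern : List String) : Prop :=
  pattern ≠ [] ∧ ∀ s ∈ pattern, (pattern.headD "").length ≤ s.length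
instance (pattern : List String) : Decidable (Pre_get_vert_symm_sum pattern) := by
  unfold Pre_get_vert_symm_sum; infer_instance

def pvWitness_get_vert_symm_sum : List String := ["#.#", "#.#"]

def Spec_get_vert_symm_sum (pattern : List String) (out : Int) : Prop := out = get_vert_symm_sum_alt pattern
instance (pattern : List String) (out : Int) : Decidable (Spec_get_vert_symm_sum pattern out) := by unfold Spec_get_vert_symm_sum; infer_instance

-- ===== CLAIM (what is proved, stated in full; the proofs are below) =====
def Claim_equal_get_vert_symm_sum : Prop := ∀ (pattern : List String), Dom_get_vert_symm_sum pattern → Pre_get_vert_symm_sum pattern → Spec_get_vert_symm_sum pattern (get_vert_symm_sum pattern)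

-- ===== LEMMAS AND PROOFS =====
lemma map_range_getD {α β : Type} (xs : List α) (d : α) (f : α → β) :
    (List.range xs.length).map (fun i => f (xs.getD i d)) = xs.map f := by
  induction xs with
  | nil => simp
  | cons x xs ih =>
    simp only [List.length_cons, List.range_succ_eq_map, List.map_cons, List.map_map,
      List.getD_cons_zero]
    exact congrArg _ ih

lemma pvColsA_eq (pattern : List String) (t1 t2 : Int) :
    pvColsA pattern t1 t2 = (pvColB pattern t1.toNat, pvColB pattern t2.toNat) := by
  unfold pvColsA pvColB
  rw [PySem.List.foldl_prod_mk (fun c i => c ++ [pvCharA pattern i t1])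
      (fun c i => c ++ [pvCharA pattern i t2]),
    PySem.List.foldl_append_singleton_eq_map, PySem.List.foldl_append_singleton_eq_map]
  simp only [List.nil_append, pvCharA]
  exact congrArg₂ _
    (map_range_getD pattern "" (fun row => row.toList.getD t1.toNat ' '))
    (map_range_getD pattern "" (fun row => row.toList.getD t2.toNat ' '))


lemma pvWhileA_char (pattern : List String) (W j : Nat) (hj : j < W) :
    ∀ n (k : Nat) (b : Bool), 1 ≤ k → min j (W - j) + 1 - k ≤ n →
      (pvWhileA pattern (W : Int) (j : Int) (k : Int) b = true ↔
        (if k ≤ min j (W - j) then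
            (∀ k', k ≤ k' → k' ≤ min j (W - j) →
              pvColB pattern (j - k') = pvColB pattern (j + k' - 1))
          else b = true)) := by
  intro n
  induction n with
  | zero =>
    intro k b hk hn
    rw [pvWhileA]
    have hcond : ¬((j:Int) - k > -1 ∧ (j:Int) + k - 1 < W) := by omega
    rw [dif_neg hcond]
    have : ¬(k ≤ min j (W - j)) := by omega
    simp [this]
  | succ n ih =>
    intro k b hk hn
    rw [pvWhileA]
    by_cases hcond : ((j:Int) - k > -1 ∧ (j:Int) + k - 1 < W)
    · rw [dif_pos hcond]
      have hkm : k ≤ min j (W - j) := by omega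
      have ht1 : ((j:Int) - k).toNat = j - k := by omega
      have ht2 : ((j:Int) + k - 1).toNat = j + k - 1 := by omega
      rw [pvColsA_eq, ht1, ht2]
      simp only [hkm, if_true]
      have hcast : ((k:Int) + 1) = ((k+1 : Nat) : Int) := by push_cast; ring
      rw [hcast]
      by_cases heq : pvColB pattern (j - k) = pvColB pattern (j + k - 1)
      · simp only [heq, if_true]
        rw [ih (k+1) true (by omega) (by omega)]
        constructor
        · intro h k' hk' hk'm
          rcases Nat.eq_or_lt_of_le hk' with h1 | h1
          · subst h1; exact heq
          · by_cases h2 : k + 1 ≤ min j (W - j)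
            · rw [if_pos h2] at h; exact h k' h1 hk'm
            · omega
        · intro h
          by_cases h2 : k + 1 ≤ min j (W - j)
          · rw [if_pos h2]; exact fun k' hk' hk'm => h k' (by omega) hk'm
          · rw [if_neg h2]
      · rw [if_neg heq]
        constructor
        · intro h; exact absurd h (by simp)
        · intro h; exact absurd (h k le_rfl hkm) heq
    · rw [dif_neg hcond]
      have : ¬(k ≤ min j (W - j)) := by omega
      simp [this]

lemma sliceB_char (pattern : List String) (W j : Nat) (h1 : 1 ≤ j) (hj : j < W) :
    (((((List.range W).map (pvColB pattern)).take j).drop (j - min j (W - j))).reverse =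
        (((List.range W).map (pvColB pattern)).drop j).take (min j (W - j)) ↔
      (∀ k', 1 ≤ k' → k' ≤ min j (W - j) →
        pvColB pattern (j - k') = pvColB pattern (j + k' - 1))) := by
  set m := min j (W - j) with hm
  have hmj : m ≤ j := Nat.min_le_left _ _
  have hmW : m ≤ W - j := Nat.min_le_right _ _
  have hL : ((((List.range W).map (pvColB pattern)).take j).drop (j - m)).reverse =
      (List.range m).map (fun x => pvColB pattern (j - 1 - x)) := by
    rw [← List.map_take, ← List.map_drop, ← List.map_reverse]
    rw [List.take_range, Nat.min_eq_left (le_of_lt hj)]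
    rw [List.range_eq_range', List.drop_range', List.reverse_range']
    rw [show (0 + (j - m) * 1) = j - m by omega, show j - (j - m) = m by omega]
    rw [List.map_map]
    apply List.map_congr_left
    intro x hx
    have hxm : x < m := List.mem_range.mp hx
    simp only [Function.comp_apply]
    congr 1
    omega
  have hR : (((List.range W).map (pvColB pattern)).drop j).take m =
      (List.range m).map (fun x => pvColB pattern (j + x)) := by
    rw [← List.map_drop, ← List.map_take]
    rw [List.range_eq_range', List.drop_range']
    rw [show (0 + j * 1) = j by omega]
    rw [List.range'_eq_map_range, ← List.map_take, List.take_range,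
      Nat.min_eq_left (by omega : m ≤ W - j), List.map_map]
    rfl
  rw [hL, hR, List.map_inj_left]
  constructor
  · intro h k' hk1 hk'm
    have := h (k' - 1) (List.mem_range.mpr (by omega))
    have e1 : j - 1 - (k' - 1) = j - k' := by omega
    have e2 : j + (k' - 1) = j + k' - 1 := by omega
    rwa [e1, e2] at this
  · intro h x hx
    have hxm : x < m := List.mem_range.mp hx
    have := h (x + 1) (by omega) (by omega)
    have e1 : j - (x + 1) = j - 1 - x := by omega
    have e2 : j + (x + 1) - 1 = j + x := by omega
    rwa [e1, e2] at this
lemma whileA_iff_slice (pattern : List String) (W j : Nat) (h1 : 1 ≤ j) (hj : j < W) :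
    (pvWhileA pattern (W : Int) (j : Int) 1 false = true ↔
      ((((List.range W).map (pvColB pattern)).take j).drop (j - min j (W - j))).reverse =
        (((List.range W).map (pvColB pattern)).drop j).take (min j (W - j))) := by
  have hc := pvWhileA_char pattern W j hj (min j (W - j)) 1 false le_rfl (by omega)
  have h1m : 1 ≤ min j (W - j) := by omega
  rw [if_pos h1m] at hc
  rw [show ((1:Nat):Int) = 1 by norm_num] at hc
  rw [hc, sliceB_char pattern W j h1 hj]

lemma forA_eq_findB (pattern : List String) (W : Nat) :
    ∀ l : List Nat, (∀ j ∈ l, 1 ≤ j ∧ j < W) →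
      pvForA pattern (W : Int) (l.map (Nat.cast : Nat → Int)) =
        pvFindB ((List.range W).map (pvColB pattern)) W l := by
  intro l
  induction l with
  | nil => intro _; rfl
  | cons j js ih =>
    intro hmem
    obtain ⟨hj1, hjW⟩ := hmem j (List.mem_cons_self ..)
    simp only [List.map_cons, pvForA, pvFindB]
    rw [ih (fun x hx => hmem x (List.mem_cons_of_mem _ hx))]
    by_cases hc : ((((List.range W).map (pvColB pattern)).take j).drop
          (j - min j (W - j))).reverse =
        (((List.range W).map (pvColB pattern)).drop j).take (min j (W - j))
    · rw [if_pos ((whileA_iff_slice pattern W j hj1 hjW).mpr hc), if_pos hc]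
    · rw [if_neg (fun h => hc ((whileA_iff_slice pattern W j hj1 hjW).mp (by simpa using h))),
        if_neg hc]

lemma whileA_zero (pattern : List String) (W : Int) :
    pvWhileA pattern W 0 1 false = false := by
  rw [pvWhileA]
  exact dif_neg (by omega)
theorem main_eq (pattern : List String) :
    get_vert_symm_sum pattern = get_vert_symm_sum_alt pattern := by
  unfold get_vert_symm_sum get_vert_symm_sum_alt
  rw [PySem.List.pyRange_zero_natCast]
  cases hW : (pattern.headD "").length with
  | zero => rfl
  | succ n =>
    rw [List.range_eq_range', List.range'_succ, List.map_cons]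
    have h0 : ((0:Nat):Int) = 0 := by norm_num
    rw [h0]
    show pvForA pattern _ (0 :: _) = _
    rw [pvForA, whileA_zero, if_neg (by simp)]
    rw [show (0 + 1) = 1 by omega]
    show _ = pvFindB (List.map (pvColB pattern) (List.range (n+1))) (n+1) (List.range' 1 (n+1-1))
    rw [show (n + 1 - 1) = n by omega]
    exact forA_eq_findB pattern (n+1) (List.range' 1 n)
      (fun x hx => by have := List.mem_range'_1.mp hx; omega)

-- ===== VERDICT (by name: the statement is the Claim_ definition above) =====
theorem get_vert_symm_sum_spec : Claim_equal_get_vert_symm_sum := by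
  intro pattern _ _
  unfold Spec_get_vert_symm_sum
  exact main_eq pattern
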